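-- pv_equiv track=rewrite | github.com/thelpix/tareaIP | Python/simulacro/parcial2.py | cuenta_posiciones_por_nacion
-- ===== SOURCE A (Python) =====
-- def cuenta_posiciones_por_nacion(naciones: list[str], torneos: dict[int,list[str]]) -> dict[str,list[int]]:
--     res : dict[str,list[int]] = {}
--     for nacion in naciones:
--         res[nacion] = [0] * len(naciones) #establece longitud segun cantidad de naciones
--     for anio in torneos.keys():
--         for i in range(len(torneos[anio])):
--             participante = torneos[anio][i]
--             for j in range(len(naciones)):
--                 if participante == naciones[j]:
--                     res[participante][i] += 1
--     return res
-- ===== SOURCE B (Python) =====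
-- def cuenta_posiciones_por_nacion(naciones: list[str], torneos: dict[int, list[str]]) -> dict[str, list[int]]:
--     # One pass over all tournaments builds an index participant -> positions at
--     # which it finished (with repetitions); then each listing in `naciones`
--     # accumulates its position tallies into its row.
--     pos: dict[str, list[int]] = {}
--     for ps in torneos.values():
--         for i, p in enumerate(ps):
--             pos.setdefault(p, []).append(i)
--     res: dict[str, list[int]] = {}
--     for nacion in naciones:
--         fila = res.setdefault(nacion, [0] * len(naciones))
--         for i in pos.get(nacion, []):
--             fila[i] += 1
--     return res
-- ===== Notes on version B (the rewrite author's own statement) =====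
-- stated objective: faster
-- what changed: B builds a position index (participant -> list of finishing positions) in one pass over all tournaments and then accumulates each listing in naciones from that index, replacing A's inner linear scan over naciones for every participant of every tournament.
import Mathlib
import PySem

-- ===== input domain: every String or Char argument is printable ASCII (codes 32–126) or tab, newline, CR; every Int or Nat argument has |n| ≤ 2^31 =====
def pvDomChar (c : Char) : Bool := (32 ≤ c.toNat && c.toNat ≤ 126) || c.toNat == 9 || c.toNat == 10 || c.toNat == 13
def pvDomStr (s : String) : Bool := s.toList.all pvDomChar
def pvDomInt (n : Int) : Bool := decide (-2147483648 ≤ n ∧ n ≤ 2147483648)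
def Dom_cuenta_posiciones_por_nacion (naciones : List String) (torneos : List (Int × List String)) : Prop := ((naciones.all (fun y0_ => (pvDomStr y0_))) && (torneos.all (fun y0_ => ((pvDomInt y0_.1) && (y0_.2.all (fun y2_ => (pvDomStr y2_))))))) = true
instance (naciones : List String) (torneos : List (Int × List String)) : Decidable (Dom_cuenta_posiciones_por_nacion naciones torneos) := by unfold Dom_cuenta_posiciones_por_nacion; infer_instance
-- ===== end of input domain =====

-- B replaces A's per-participant inner scan over `naciones` with a position index
-- built in one pass over the tournaments, then one accumulating pass over `naciones`
-- (objective: faster).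


-- ===== PORT A =====
-- Literal port of A: res = {n: [0]*len(naciones)}; for anio in torneos.keys():
-- for i in range(len(torneos[anio])): for j in range(len(naciones)):
-- if participante == naciones[j]: res[participante][i] += 1.
-- `res[participante][i] += 1` is ported as List.set at i.toNat; exact for i < len(naciones),
-- which Pre_ guarantees (Python raises IndexError otherwise).
def cuenta_posiciones_por_nacion (naciones : List String) (torneos : List (Int × List String)) : List (String × List Int) :=
  let d : PySem.Dict Int (List String) := PySem.Dict.ofList torneos
  let res0 : PySem.Dict String (List Int) :=
    naciones.foldl (fun r nacion => r.insert nacion (List.replicate naciones.length 0)) PySem.Dict.empty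
  let res :=
    d.keys.foldl (fun r anio =>
      (PySem.List.pyRange 0 (PySem.List.len (d.getD anio []))).foldl (fun r i =>
        let participante := PySem.List.pyGetD (d.getD anio []) i ""
        (PySem.List.pyRange 0 (PySem.List.len naciones)).foldl (fun r j =>
          if participante == PySem.List.pyGetD naciones j "" then
            r.modify participante [] (fun l => l.set i.toNat (l.getD i.toNat 0 + 1))
          else r) r) r) res0
  res.items

-- ===== PORT B =====
-- Literal port of Source B. `pos.setdefault(p, []).append(i)` (setdefault, then in-place
-- append through the returned reference) is ported as Dict.modify with default [],
-- which has exactly that insertion-order semantics; likewise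
-- `fila = res.setdefault(nacion, [0]*N)` followed by in-place `fila[i] += 1` writes
-- is ported as Dict.modify applying the row updates. `fila[i] += 1` is List.set at
-- i.toNat (enumerate indices are >= 0); exact for i < len(naciones), which Pre_
-- guarantees (Python raises IndexError otherwise).
def cuenta_posiciones_por_nacion_alt (naciones : List String) (torneos : List (Int × List String)) : List (String × List Int) :=
  let pos : PySem.Dict String (List Int) :=
    (PySem.Dict.ofList torneos).values.foldl (fun pos ps =>
      (PySem.List.enumerate ps).foldl (fun pos ip =>
        pos.modify ip.2 [] (fun l => l ++ [ip.1])) pos) PySem.Dict.empty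
  let res : PySem.Dict String (List Int) :=
    naciones.foldl (fun res nacion =>
      res.modify nacion (List.replicate naciones.length 0) (fun fila =>
        (pos.getD nacion []).foldl (fun fila i =>
          fila.set i.toNat (fila.getD i.toNat 0 + 1)) fila)) PySem.Dict.empty
  res.items

-- ===== PRECONDITION & SPEC =====
-- Pre_ excludes exactly the inputs on which Python A raises IndexError (a participant
-- from `naciones` at a position >= len(naciones) in some tournament); B raises there too.
def Pre_cuenta_posiciones_por_nacion (naciones : List String) (torneos : List (Int × List String)) : Prop :=
  ((PySem.Dict.ofList torneos).values.all
    (fun ps => (ps.drop naciones.length).all (fun s => !(naciones.contains s)))) = true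
instance (naciones : List String) (torneos : List (Int × List String)) : Decidable (Pre_cuenta_posiciones_por_nacion naciones torneos) := by unfold Pre_cuenta_posiciones_por_nacion; infer_instance
def pvWitness_cuenta_posiciones_por_nacion : List String × (List (Int × List String)) :=
  (["AR", "BR"], [(2021, ["BR", "AR"]), (2022, ["XX", "BR"])])
def Spec_cuenta_posiciones_por_nacion (naciones : List String) (torneos : List (Int × List String)) (out : List (String × List Int)) : Prop := out = cuenta_posiciones_por_nacion_alt naciones torneos
instance (naciones : List String) (torneos : List (Int × List String)) (out : List (String × List Int)) : Decidable (Spec_cuenta_posiciones_por_nacion naciones torneos out) := by unfold Spec_cuenta_posiciones_por_nacion; infer_instance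

-- ===== CLAIM (what is proved, stated in full; the proofs are below) =====
def Claim_equal_cuenta_posiciones_por_nacion : Prop := ∀ (naciones : List String) (torneos : List (Int × List String)), Dom_cuenta_posiciones_por_nacion naciones torneos → Pre_cuenta_posiciones_por_nacion naciones torneos → Spec_cuenta_posiciones_por_nacion naciones torneos (cuenta_posiciones_por_nacion naciones torneos)

-- ===== LEMMAS AND PROOFS =====

-- A's j-loop ("find p by scanning naciones, +1 per match") iterates the increment count-many times.
theorem pv_foldl_if_eq_iterate {α β : Type} [BEq α] [LawfulBEq α] (M : β → β) (p : α) (ns : List α) (r : β) :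
    ns.foldl (fun r s => if p == s then M r else r) r = M^[ns.count p] r := by
  induction ns generalizing r with
  | nil => rfl
  | cons s ns ih =>
    simp only [List.foldl_cons, List.count_cons]
    by_cases h : p = s
    · subst h
      simp [ih, Function.iterate_succ_apply]
    · have h' : (s == p) = false := by simp [Ne.symm h]
      simp [h, h', ih]

-- A's per-participant inner loop, as an iterate of the modify.
theorem pv_stepA (naciones : List String) (p : String) {β : Type} (M : β → β) (r : β) :
    (PySem.List.pyRange 0 (PySem.List.len naciones)).foldl
      (fun r j => if p == PySem.List.pyGetD naciones j "" then M r else r) r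
      = M^[naciones.count p] r := by
  rw [PySem.List.foldl_pyRange_zero_pyGetD naciones ""
        (fun r s => if p == s then M r else r) r]
  exact pv_foldl_if_eq_iterate M p naciones r

-- modify at the same key with the same default fuses.
theorem pv_modify_modify {κ ν : Type} [BEq κ] [LawfulBEq κ] (d : PySem.Dict κ ν) (k : κ) (dflt : ν) (f g : ν → ν) :
    (d.modify k dflt f).modify k dflt g = d.modify k dflt (fun v => g (f v)) := by
  show (d.insert k (f (d.getD k dflt))).insert k
      (g ((d.insert k (f (d.getD k dflt))).getD k dflt)) = _
  rw [PySem.Dict.getD_insert_self, PySem.Dict.insert_insert_self]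
  rfl

-- n ≥ 1 iterations of "+1 at index i" collapse to a single "+n at index i".
theorem pv_iterate_inc {κ : Type} [BEq κ] [LawfulBEq κ] (k : κ) (i : Nat) (n : Nat)
    (d : PySem.Dict κ (List Int)) :
    (fun r : PySem.Dict κ (List Int) => r.modify k [] (fun l => l.set i (l.getD i 0 + 1)))^[n + 1] d
      = d.modify k [] (fun l => l.set i (l.getD i 0 + (n + 1 : Int))) := by
  induction n generalizing d with
  | zero => simp
  | succ m ih =>
    rw [Function.iterate_succ_apply, ih, pv_modify_modify]
    congr 1
    funext l
    by_cases h : i < l.length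
    · simp [List.getD_eq_getElem?_getD, h, List.set_set]
      ring_nf
    · have h1 : l.set i (l.getD i 0 + 1) = l := List.set_eq_of_length_le (by omega)
      have h2 : ∀ c : Int, l.set i (l.getD i 0 + c) = l := fun c => List.set_eq_of_length_le (by omega)
      rw [h1, h2, h2]

-- getD at another key is untouched by iterated modifies.
theorem pv_iter_getD_ne {κ : Type} [BEq κ] [LawfulBEq κ] (p n : κ) (hne : n ≠ p)
    (d0 : List Int) (f : List Int → List Int) (k : Nat) (d : PySem.Dict κ (List Int)) :
    ((fun r : PySem.Dict κ (List Int) => r.modify p d0 f)^[k] d).getD n d0 = d.getD n d0 := by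
  induction k generalizing d with
  | zero => rfl
  | succ m ih =>
    rw [Function.iterate_succ_apply, ih, PySem.Dict.getD_modify_of_ne _ _ _ hne]

-- modify at a contained key leaves the key list unchanged.
theorem pv_modify_keys {ν : Type} (d : PySem.Dict String ν) (p : String) (d0 : ν) (f : ν → ν)
    (h : d.contains p = true) : (d.modify p d0 f).keys = d.keys := by
  rw [PySem.Dict.keys_modify, PySem.Dict.keys_insert_of_contains _ _ h]

theorem pv_iter_modify_keys {ν : Type} (p : String) (d0 : ν) (f : ν → ν) (k : Nat) :
    ∀ (d : PySem.Dict String ν), d.contains p = true →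
    ((fun d : PySem.Dict String ν => d.modify p d0 f)^[k] d).keys = d.keys := by
  induction k with
  | zero => intro d _; rfl
  | succ m ih =>
    intro d h
    rw [Function.iterate_succ_apply]
    have hc : (d.modify p d0 f).contains p = true := by
      rw [PySem.Dict.contains_eq_decide_mem_keys, pv_modify_keys d p d0 f h,
        ← PySem.Dict.contains_eq_decide_mem_keys]
      exact h
    rw [ih _ hc, pv_modify_keys d p d0 f h]

-- one tournament of A leaves the keys unchanged (all modified keys lie in naciones ⊆ keys r).
theorem pv_tourn_keys (naciones : List String) (ps : List String) :
    ∀ (L : List Int) (r : PySem.Dict String (List Int)),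
    (∀ x ∈ naciones, r.contains x = true) →
    ((L.foldl (fun r i =>
        let participante := PySem.List.pyGetD ps i ""
        (PySem.List.pyRange 0 (PySem.List.len naciones)).foldl (fun r j =>
          if participante == PySem.List.pyGetD naciones j "" then
            r.modify participante [] (fun l => l.set i.toNat (l.getD i.toNat 0 + 1))
          else r) r) r).keys = r.keys) := by
  intro L
  induction L with
  | nil => intro r _; rfl
  | cons i L ih =>
    intro r h
    rw [List.foldl_cons]
    simp only
    rw [pv_stepA naciones (PySem.List.pyGetD ps i "")
        (fun r => r.modify (PySem.List.pyGetD ps i "") [] (fun l => l.set i.toNat (l.getD i.toNat 0 + 1))) r]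
    set p := PySem.List.pyGetD ps i "" with hp
    by_cases hmem : p ∈ naciones
    · have hiter := pv_iter_modify_keys p [] (fun l => l.set i.toNat (l.getD i.toNat 0 + 1))
        (naciones.count p) r (h p hmem)
      rw [ih _ (by
        intro x hx
        rw [PySem.Dict.contains_eq_decide_mem_keys, hiter, ← PySem.Dict.contains_eq_decide_mem_keys]
        exact h x hx), hiter]
    · rw [List.count_eq_zero.mpr hmem, Function.iterate_zero, id_eq, ih _ h]

-- keys are unchanged through A's whole tournament fold.
theorem pv_all_keys (naciones : List String) {α : Type} (f : α → List String) :
    ∀ (ts : List α) (r : PySem.Dict String (List Int)),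
    (∀ x ∈ naciones, r.contains x = true) →
    ((ts.foldl (fun r a =>
        (PySem.List.pyRange 0 (PySem.List.len (f a))).foldl (fun r i =>
          let participante := PySem.List.pyGetD (f a) i ""
          (PySem.List.pyRange 0 (PySem.List.len naciones)).foldl (fun r j =>
            if participante == PySem.List.pyGetD naciones j "" then
              r.modify participante [] (fun l => l.set i.toNat (l.getD i.toNat 0 + 1))
            else r) r) r) r).keys = r.keys) := by
  intro ts
  induction ts with
  | nil => intro r _; rfl
  | cons a ts ih =>
    intro r h
    rw [List.foldl_cons]
    have hone := pv_tourn_keys naciones (f a) (PySem.List.pyRange 0 (PySem.List.len (f a))) r h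
    rw [ih _ (by
      intro x hx
      rw [PySem.Dict.contains_eq_decide_mem_keys, hone, ← PySem.Dict.contains_eq_decide_mem_keys]
      exact h x hx), hone]

-- getD at n ∈ naciones through one tournament of A = the plain row fold,
-- each hit adding the multiplicity of n in naciones.
theorem pv_tourn (naciones : List String) (n : String) (hn : n ∈ naciones)
    (ps : List String) :
    ∀ (L : List Int) (r : PySem.Dict String (List Int)),
    ((L.foldl (fun r i =>
        let participante := PySem.List.pyGetD ps i ""
        (PySem.List.pyRange 0 (PySem.List.len naciones)).foldl (fun r j =>
          if participante == PySem.List.pyGetD naciones j "" then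
            r.modify participante [] (fun l => l.set i.toNat (l.getD i.toNat 0 + 1))
          else r) r) r).getD n []
      = L.foldl (fun l i => if PySem.List.pyGetD ps i "" == n then
          l.set i.toNat (l.getD i.toNat 0 + (naciones.count n : Int)) else l) (r.getD n [])) := by
  intro L
  induction L with
  | nil => intro r; rfl
  | cons i L ih =>
    intro r
    rw [List.foldl_cons, List.foldl_cons]
    simp only
    rw [pv_stepA naciones (PySem.List.pyGetD ps i "")
        (fun r => r.modify (PySem.List.pyGetD ps i "") [] (fun l => l.set i.toNat (l.getD i.toNat 0 + 1))) r]
    set p := PySem.List.pyGetD ps i "" with hp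
    by_cases hpn : p = n
    · subst hpn
      obtain ⟨m, hm⟩ : ∃ m, naciones.count p = m + 1 := by
        have hc : naciones.count p ≠ 0 := by simp [List.count_eq_zero, hn]
        exact ⟨naciones.count p - 1, by omega⟩
      rw [hm, pv_iterate_inc, ih, PySem.Dict.getD_modify_self]
      have hbt : (p == p) = true := by simp
      simp only [hbt, if_true, hm]
      push_cast
      rfl
    · have hb : (p == n) = false := by simp [hpn]
      have hinit : ((fun r : PySem.Dict String (List Int) =>
            r.modify p [] (fun l => l.set i.toNat (l.getD i.toNat 0 + 1)))^[naciones.count p] r).getD n []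
          = r.getD n [] := by
        by_cases hmem : p ∈ naciones
        · exact pv_iter_getD_ne p n (Ne.symm hpn) [] _ (naciones.count p) r
        · rw [List.count_eq_zero.mpr hmem, Function.iterate_zero, id_eq]
      rw [ih, hinit]
      simp only [hb, Bool.false_eq_true, if_false]

-- the Int-indexed row fold in Nat-range form.
theorem pv_natform (ps : List String) (n : String) (c : Int) (l : List Int) :
    (PySem.List.pyRange 0 (PySem.List.len ps)).foldl (fun l i =>
        if PySem.List.pyGetD ps i "" == n then l.set i.toNat (l.getD i.toNat 0 + c) else l) l
      = (List.range ps.length).foldl (fun l k =>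
        if ps.getD k "" == n then l.set k (l.getD k 0 + c) else l) l := by
  have hlen : PySem.List.len ps = (ps.length : Int) := by simp [PySem.List.len]
  rw [hlen, PySem.List.pyRange_zero_natCast, List.foldl_map]
  congr 1
  funext l k
  simp [PySem.List.pyGetD_natCast]

-- getD at n ∈ naciones through A's whole tournament fold = iterated row folds.
theorem pv_all_getD (naciones : List String) (n : String) (hn : n ∈ naciones)
    {α : Type} (f : α → List String) :
    ∀ (ts : List α) (r : PySem.Dict String (List Int)),
    ((ts.foldl (fun r a =>
        (PySem.List.pyRange 0 (PySem.List.len (f a))).foldl (fun r i =>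
          let participante := PySem.List.pyGetD (f a) i ""
          (PySem.List.pyRange 0 (PySem.List.len naciones)).foldl (fun r j =>
            if participante == PySem.List.pyGetD naciones j "" then
              r.modify participante [] (fun l => l.set i.toNat (l.getD i.toNat 0 + 1))
            else r) r) r) r).getD n []
      = ts.foldl (fun l a =>
          (List.range (f a).length).foldl (fun l k =>
            if (f a).getD k "" == n then l.set k (l.getD k 0 + (naciones.count n : Int)) else l) l)
          (r.getD n [])) := by
  intro ts
  induction ts with
  | nil => intro r; rfl
  | cons a ts ih =>
    intro r
    rw [List.foldl_cons, List.foldl_cons, ih,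
      pv_tourn naciones n hn (f a) (PySem.List.pyRange 0 (PySem.List.len (f a))) r,
      pv_natform]

-- the initial dict: getD of a constant-value insert fold.
theorem pv_getD_insert_const {ν : Type} (v : ν) (d0 : ν) (n : String) :
    ∀ (l : List String) (d : PySem.Dict String ν),
    (l.foldl (fun r x => r.insert x v) d).getD n d0 = if n ∈ l then v else d.getD n d0 := by
  intro l
  induction l with
  | nil => intro d; simp
  | cons x l ih =>
    intro d
    rw [List.foldl_cons, ih]
    by_cases hx : n = x <;> by_cases hl : n ∈ l <;>
      simp [hx, hl, PySem.Dict.getD_insert]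

-- one tournament's row fold: length is preserved …
theorem pv_range_set_len (c : Nat → Bool) (v : Int) (m : Nat) (l : List Int) :
    ((List.range m).foldl (fun l k => if c k then l.set k (l.getD k 0 + v) else l) l).length
      = l.length := by
  induction m with
  | zero => rfl
  | succ m ih =>
    rw [List.range_succ, List.foldl_append, List.foldl_cons, List.foldl_nil]
    by_cases h : c m
    · simp only [h, if_true, List.length_set]; exact ih
    · simp only [Bool.not_eq_true] at h
      simp only [h, Bool.false_eq_true, if_false]; exact ih

-- … and each in-range cell gains exactly its own indicator.
theorem pv_range_set_getD (c : Nat → Bool) (v : Int) (m : Nat) (l : List Int) (j : Nat) (hj : j < l.length) :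
    ((List.range m).foldl (fun l k => if c k then l.set k (l.getD k 0 + v) else l) l).getD j 0
      = l.getD j 0 + (if j < m ∧ c j then v else 0) := by
  induction m with
  | zero => simp
  | succ m ih =>
    rw [List.range_succ, List.foldl_append, List.foldl_cons, List.foldl_nil]
    set g := (List.range m).foldl (fun l k => if c k then l.set k (l.getD k 0 + v) else l) l with hg
    have hlen : g.length = l.length := pv_range_set_len c v m l
    by_cases hcm : c m
    · simp only [hcm, if_true]
      by_cases hjm : j = m
      · subst hjm
        have hs : (g.set j (g.getD j 0 + v)).getD j 0 = g.getD j 0 + v := by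
          simp [List.getD_eq_getElem?_getD, hlen ▸ hj]
        rw [hs, ih]
        simp [hcm]
      · have hs : (g.set m (g.getD m 0 + v)).getD j 0 = g.getD j 0 := by
          simp [List.getD_eq_getElem?_getD, List.getElem?_set_ne (Ne.symm hjm)]
        rw [hs, ih]
        have hiff : j < m + 1 ↔ j < m := by omega
        simp [hiff]
    · simp only [Bool.not_eq_true] at hcm
      simp only [hcm, Bool.false_eq_true, if_false]
      rw [ih]
      by_cases hjm : j = m
      · subst hjm; simp [hcm]
      · have hiff : j < m + 1 ↔ j < m := by omega
        simp [hiff]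

theorem pv_rows_len (n : String) (v : Int) (tss : List (List String)) (l : List Int) :
    (tss.foldl (fun l ps =>
        (List.range ps.length).foldl (fun l k =>
          if ps.getD k "" == n then l.set k (l.getD k 0 + v) else l) l) l).length = l.length := by
  induction tss generalizing l with
  | nil => rfl
  | cons ps tss ih => rw [List.foldl_cons, ih, pv_range_set_len]

theorem pv_rows_getD (n : String) (v : Int) (tss : List (List String)) (l : List Int) (j : Nat) (hj : j < l.length) :
    (tss.foldl (fun l ps =>
        (List.range ps.length).foldl (fun l k =>
          if ps.getD k "" == n then l.set k (l.getD k 0 + v) else l) l) l).getD j 0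
      = l.getD j 0 + v * (tss.countP (fun ps => decide (j < ps.length) && (ps.getD j "" == n)) : Int) := by
  induction tss generalizing l with
  | nil => simp
  | cons ps tss ih =>
    rw [List.foldl_cons]
    set g := (List.range ps.length).foldl (fun l k =>
          if ps.getD k "" == n then l.set k (l.getD k 0 + v) else l) l with hg
    have hlen : g.length = l.length := pv_range_set_len _ _ _ _
    have hI : (if j < ps.length ∧ (ps.getD j "" == n) = true then v else 0)
        = v * (if (decide (j < ps.length) && (ps.getD j "" == n)) = true then (1 : Int) else 0) := by
      by_cases h1 : j < ps.length <;> by_cases h2 : (ps.getD j "" == n) = true <;> simp [h1, h2]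
    rw [ih g (by omega), hg, pv_range_set_getD _ _ _ _ _ hj, List.countP_cons, hI]
    push_cast
    ring

-- fold with a projected tournament list = fold over the mapped list.
theorem pv_foldl_proj {α : Type} (f : α → List String) (n : String) (v : Int) (kl : List α) (init : List Int) :
    kl.foldl (fun l a =>
        (List.range (f a).length).foldl (fun l k =>
          if (f a).getD k "" == n then l.set k (l.getD k 0 + v) else l) l) init
      = (kl.map f).foldl (fun l ps =>
          (List.range ps.length).foldl (fun l k =>
            if ps.getD k "" == n then l.set k (l.getD k 0 + v) else l) l) init := by
  rw [List.foldl_map]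

-- A's accumulated rows over all tournaments, as a closed per-cell list.
theorem pv_final_rowA (n : String) (v : Int) (tss : List (List String)) (N : Nat) :
    tss.foldl (fun l ps =>
        (List.range ps.length).foldl (fun l k =>
          if ps.getD k "" == n then l.set k (l.getD k 0 + v) else l) l) (List.replicate N 0)
      = (List.range N).map (fun j =>
          v * (tss.countP (fun ps => decide (j < ps.length) && (ps.getD j "" == n)) : Int)) := by
  apply List.ext_getElem
  · rw [pv_rows_len]
    simp
  · intro j h1 h2
    have hjN : j < N := by
      rw [pv_rows_len] at h1
      simpa using h1
    rw [← List.getD_eq_getElem _ 0 h1,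
      pv_rows_getD n v tss _ j (by simp [hjN])]
    simp [hjN]

-- ===== B-side lemmas =====

-- the position index: pos[n] is the list of positions of n over all tournaments.
theorem pv_pos_getD (tss : List (List String)) (n : String) :
    (tss.foldl (fun pos ps =>
        (PySem.List.enumerate ps).foldl (fun pos ip =>
          pos.modify ip.2 [] (fun l => l ++ [ip.1])) pos) PySem.Dict.empty).getD n []
      = ((tss.flatMap (fun ps => PySem.List.enumerate ps)).filter
          (fun ip => ip.2 == n)).map (fun ip => ip.1) := by
  rw [← List.foldl_flatMap]
  set L := tss.flatMap (fun ps => PySem.List.enumerate ps) with hL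
  have hswap : L.foldl (fun pos ip => pos.modify ip.2 [] (fun l => l ++ [ip.1]))
        (PySem.Dict.empty : PySem.Dict String (List Int))
      = (L.map Prod.swap).foldl (fun pos q => pos.modify q.1 [] (fun l => l ++ [q.2]))
        PySem.Dict.empty := by
    rw [List.foldl_map]
    rfl
  rw [hswap, PySem.Dict.getD_foldl_modify_append, List.filter_map]
  simp [Function.comp_def, PySem.Dict.getD_empty]

-- B's nation loop at key n applies n's row pass once per occurrence of n.
theorem pv_foldB_getD (g : String → List Int → List Int) (R0 : List Int) (n : String) :
    ∀ (xs : List String) (d : PySem.Dict String (List Int)),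
    (xs.foldl (fun d x => d.modify x R0 (g x)) d).getD n R0 = (g n)^[xs.count n] (d.getD n R0) := by
  intro xs
  induction xs with
  | nil => intro d; rfl
  | cons x xs ih =>
    intro d
    rw [List.foldl_cons, ih, List.count_cons]
    by_cases hx : x = n
    · subst hx
      simp [PySem.Dict.getD_modify_self, Function.iterate_succ_apply]
    · have hb : (x == n) = false := by simp [hx]
      rw [PySem.Dict.getD_modify_of_ne _ _ _ (Ne.symm hx)]
      simp [hb]

-- one pass of "+1 at each listed position": length is preserved …
theorem pv_pass_len (L : List Int) (r : List Int) :
    (L.foldl (fun r i => r.set i.toNat (r.getD i.toNat 0 + 1)) r).length = r.length := by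
  induction L generalizing r with
  | nil => rfl
  | cons i L ih => rw [List.foldl_cons, ih, List.length_set]

-- … and cell j gains the number of occurrences of j in the position list.
theorem pv_pass_getD (L : List Int) (hL : ∀ i ∈ L, 0 ≤ i) (r : List Int) (j : Nat) (hj : j < r.length) :
    (L.foldl (fun r i => r.set i.toNat (r.getD i.toNat 0 + 1)) r).getD j 0
      = r.getD j 0 + (L.count (j : Int) : Int) := by
  induction L generalizing r with
  | nil => simp
  | cons i L ih =>
    rw [List.foldl_cons, List.count_cons,
      ih (fun x hx => hL x (List.mem_cons_of_mem _ hx)) _ (by rw [List.length_set]; exact hj)]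
    by_cases hij : i.toNat = j
    · have hi : i = (j : Int) := by
        have := hL i (List.mem_cons_self ..)
        omega
      have hs : (r.set i.toNat (r.getD i.toNat 0 + 1)).getD j 0 = r.getD j 0 + 1 := by
        subst hij
        simp [List.getD_eq_getElem?_getD, hj]
      rw [hs, hi]
      simp
      ring
    · have hs : (r.set i.toNat (r.getD i.toNat 0 + 1)).getD j 0 = r.getD j 0 := by
        simp [List.getD_eq_getElem?_getD, List.getElem?_set_ne hij]
      have hb : (i == (j : Int)) = false := by
        simp only [beq_eq_false_iff_ne, ne_eq]
        intro h; exact hij (by omega)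
      rw [hs, hb]
      simp

-- c passes add c times the tally.
theorem pv_pass_iter (L : List Int) (hL : ∀ i ∈ L, 0 ≤ i) (c : Nat) (r : List Int) (j : Nat) (hj : j < r.length) :
    (((fun r : List Int => L.foldl (fun r i => r.set i.toNat (r.getD i.toNat 0 + 1)) r)^[c]) r).getD j 0
      = r.getD j 0 + (c : Int) * (L.count (j : Int) : Int) := by
  induction c generalizing r with
  | zero => simp
  | succ m ih =>
    rw [Function.iterate_succ_apply, ih _ (by rw [pv_pass_len]; exact hj),
      pv_pass_getD L hL r j hj]
    push_cast
    ring

theorem pv_pass_iter_len (L : List Int) (c : Nat) (r : List Int) :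
    (((fun r : List Int => L.foldl (fun r i => r.set i.toNat (r.getD i.toNat 0 + 1)) r)^[c]) r).length
      = r.length := by
  induction c generalizing r with
  | zero => rfl
  | succ m ih => rw [Function.iterate_succ_apply, ih, pv_pass_len]

-- all recorded positions are nonnegative (enumerate counts from 0).
theorem pv_pos_nonneg (tss : List (List String)) (n : String) :
    ∀ i ∈ ((tss.flatMap (fun ps => PySem.List.enumerate ps)).filter
        (fun ip => ip.2 == n)).map (fun ip => ip.1), 0 ≤ i := by
  intro i hi
  simp only [List.mem_map, List.mem_filter, List.mem_flatMap] at hi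
  obtain ⟨ip, ⟨⟨ps, _, hmem⟩, _⟩, hfst⟩ := hi
  rw [PySem.List.enumerate_eq_map_pyRange ps ""] at hmem
  simp only [List.mem_map] at hmem
  obtain ⟨k, hk, hkip⟩ := hmem
  have h0 : (0 : Int) ≤ k := by
    have := PySem.List.mem_pyRange_one.mp hk
    omega
  rw [← hfst, ← hkip]
  exact h0

-- Bool equality of cast Nats mirrors the Nat one.
theorem pv_beq_cast (k j : Nat) : (((k : Int)) == ((j : Int))) = (k == j) := by
  by_cases h : k = j
  · simp [h]
  · have h2 : (k : Int) ≠ (j : Int) := by exact_mod_cast h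
    simp [h, h2]

theorem pv_countP_range (c : Nat → Bool) (j m : Nat) :
    (List.range m).countP (fun k => (k == j) && c k) = if j < m ∧ c j = true then 1 else 0 := by
  induction m with
  | zero => simp
  | succ m ihm =>
    rw [List.range_succ, List.countP_append, ihm]
    by_cases hjm : j = m
    · subst hjm
      by_cases hc : c j = true <;> simp [hc]
    · have hiff : j < m + 1 ↔ j < m := by omega
      have hb : (m == j) = false := by simp [Ne.symm hjm]
      simp [hiff, hb]

-- one tournament contributes its hit indicator to n's tally at position j.
theorem pv_enum_count (ps : List String) (n : String) (j : Nat) :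
    (((PySem.List.enumerate ps).filter (fun ip => ip.2 == n)).map (fun ip => ip.1)).count (j : Int)
      = if (decide (j < ps.length) && (ps.getD j "" == n)) = true then 1 else 0 := by
  rw [PySem.List.enumerate_eq_map_pyRange ps ""]
  have hlen : PySem.List.len ps = (ps.length : Int) := by simp [PySem.List.len]
  rw [hlen, PySem.List.pyRange_zero_natCast, List.map_map, List.filter_map, List.map_map,
    List.count_eq_countP, List.countP_map, List.countP_filter]
  simp only [Function.comp_def]
  have hcg : (List.range ps.length).countP
      (fun k : Nat => (((k : Int), PySem.List.pyGetD ps (k : Int) "").1 == (j : Int)) &&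
        (((k : Int), PySem.List.pyGetD ps (k : Int) "").2 == n))
      = (List.range ps.length).countP (fun k => (k == j) && (ps.getD k "" == n)) := by
    apply List.countP_congr
    intro k _
    simp [PySem.List.pyGetD_natCast, pv_beq_cast]
  rw [hcg, pv_countP_range]
  by_cases h1 : j < ps.length <;> by_cases h2 : (ps.getD j "" == n) = true <;> simp [h1, h2]

-- tally of position j in n's position list = per-tournament hit count.
theorem pv_count_pos (tss : List (List String)) (n : String) (j : Nat) :
    (((tss.flatMap (fun ps => PySem.List.enumerate ps)).filter
        (fun ip => ip.2 == n)).map (fun ip => ip.1)).count (j : Int)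
      = tss.countP (fun ps => decide (j < ps.length) && (ps.getD j "" == n)) := by
  induction tss with
  | nil => rfl
  | cons ps tss ih =>
    rw [List.flatMap_cons, List.filter_append, List.map_append, List.count_append, ih,
      List.countP_cons, pv_enum_count]
    exact Nat.add_comm _ _

-- B's final row for n, as the same closed per-cell list as A's.
theorem pv_final_rowB (tss : List (List String)) (n : String) (c N : Nat) :
    ((fun fila : List Int =>
        (((tss.flatMap (fun ps => PySem.List.enumerate ps)).filter
            (fun ip => ip.2 == n)).map (fun ip => ip.1)).foldl
          (fun fila i => fila.set i.toNat (fila.getD i.toNat 0 + 1)) fila)^[c]) (List.replicate N 0)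
      = (List.range N).map (fun j =>
          (c : Int) * (tss.countP (fun ps => decide (j < ps.length) && (ps.getD j "" == n)) : Int)) := by
  apply List.ext_getElem
  · rw [pv_pass_iter_len]
    simp
  · intro j h1 h2
    have hjN : j < N := by
      rw [pv_pass_iter_len] at h1
      simpa using h1
    rw [← List.getD_eq_getElem _ 0 h1,
      pv_pass_iter _ (pv_pos_nonneg tss n) c _ j (by simp [hjN]),
      pv_count_pos tss n j]
    simp [hjN]

-- ===== VERDICT (by name: the statement is the Claim_ definition above) =====
theorem cuenta_posiciones_por_nacion_spec : Claim_equal_cuenta_posiciones_por_nacion := by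
  intro naciones torneos _ _
  unfold Spec_cuenta_posiciones_por_nacion
  simp only [cuenta_posiciones_por_nacion, cuenta_posiciones_por_nacion_alt]
  rw [PySem.Dict.values_eq_map_keys (PySem.Dict.ofList torneos)
        (PySem.Dict.nodup_keys_ofList torneos) []]
  set kl := (PySem.Dict.ofList torneos).keys with hkl
  set tss := kl.map (fun anio => (PySem.Dict.ofList torneos).getD anio []) with htss
  set R0 := List.replicate naciones.length (0 : Int) with hR0
  set res0 : PySem.Dict String (List Int) := naciones.foldl
      (fun r nacion => r.insert nacion R0) PySem.Dict.empty with hres0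
  have hk0 : res0.keys = PySem.Set.ofList naciones := by
    rw [hres0, PySem.Dict.keys_foldl_insert naciones (fun _ _ => R0) PySem.Dict.empty,
      PySem.Dict.keys_empty, PySem.Set.update_nil_left]
  have hcont0 : ∀ x ∈ naciones, res0.contains x = true := by
    intro x hx
    rw [PySem.Dict.contains_eq_decide_mem_keys, hk0]
    simp [PySem.Set.mem_ofList, hx]
  have hkeysA := pv_all_keys naciones
      (fun anio => (PySem.Dict.ofList torneos).getD anio []) kl res0 hcont0
  -- A's items, via its keys
  rw [PySem.Dict.items_eq_map_keys _ (by rw [hkeysA, hk0]; exact PySem.Set.nodup_ofList naciones)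
        ([] : List Int), hkeysA, hk0]
  -- B's items, via its keys
  have hkB : (naciones.foldl (fun res nacion =>
        res.modify nacion R0 (fun fila =>
          (((tss.foldl (fun pos ps =>
              (PySem.List.enumerate ps).foldl (fun pos ip =>
                pos.modify ip.2 [] (fun l => l ++ [ip.1])) pos) PySem.Dict.empty)).getD nacion []).foldl
            (fun fila i => fila.set i.toNat (fila.getD i.toNat 0 + 1)) fila)) PySem.Dict.empty).keys
      = PySem.Set.ofList naciones := by
    rw [PySem.Dict.keys_foldl_modify naciones R0 _ PySem.Dict.empty,
      PySem.Dict.keys_empty, PySem.Set.update_nil_left]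
  rw [PySem.Dict.items_eq_map_keys _ (by rw [hkB]; exact PySem.Set.nodup_ofList naciones) R0, hkB]
  apply List.map_congr_left
  intro n hnS
  have hn : n ∈ naciones := (PySem.Set.mem_ofList naciones n).mp hnS
  refine Prod.ext rfl ?_
  simp only
  -- A's row at n
  have hcellA := pv_all_getD naciones n hn
      (fun anio => (PySem.Dict.ofList torneos).getD anio []) kl res0
  rw [hres0, pv_getD_insert_const R0 [] n naciones PySem.Dict.empty] at hcellA
  simp only [hn, if_true] at hcellA
  rw [← hres0] at hcellA
  rw [hcellA, pv_foldl_proj, ← htss]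
  -- B's row at n
  have hcellB := pv_foldB_getD (fun nacion fila =>
        (((tss.foldl (fun pos ps =>
            (PySem.List.enumerate ps).foldl (fun pos ip =>
              pos.modify ip.2 [] (fun l => l ++ [ip.1])) pos) PySem.Dict.empty)).getD nacion []).foldl
          (fun fila i => fila.set i.toNat (fila.getD i.toNat 0 + 1)) fila) R0 n naciones
      PySem.Dict.empty
  rw [hcellB]
  rw [PySem.Dict.getD_empty]
  simp only [pv_pos_getD tss n]
  rw [hR0, pv_final_rowA n ((naciones.count n : Nat) : Int) tss naciones.length,
    pv_final_rowB tss n (naciones.count n) naciones.length]
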